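-- pv_equiv track=rewrite | github.com/BrunoFernandes25/LA-II | Treino1/horario.py | verificar_horario
-- ===== SOURCE A (Python) =====
-- def verificar_horario(lista):
--     chaves_remover = set()  # cria um conjunto para armazenar as chaves a remover
--     for chave, valores in lista.items():
--         i = 0
--         while i < len(valores):
--             dia1, hora1, duracao1 = valores[i]
--             j = i+1
--             while j < len(valores):
--                 dia2, hora2, duracao2 = valores[j]
--                 if dia1 == dia2:
--                     if hora1 + duracao1 > hora2:
--                         # adiciona a chave a remover ao conjunto
--                         chaves_remover.add(chave)
--                         break  # sai do loop interno, pois a chave será removida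
--                     else:
--                         j += 1
--                 else:
--                     j += 1
--             i += 1
--     for chave in chaves_remover:
--         del lista[chave]  # remove a chave e seus valores do dicionário
--     return lista
-- ===== SOURCE B (Python) =====
-- def _conflito(valores):
--     # single pass: per-day running maximum of (hora + duracao)
--     fim = {}
--     for dia, hora, duracao in valores:
--         if dia in fim:
--             if fim[dia] > hora:
--                 return True
--             fim[dia] = max(fim[dia], hora + duracao)
--         else:
--             fim[dia] = hora + duracao
--     return False
--
--
-- def verificar_horario(lista):
--     for chave in [chave for chave, valores in lista.items() if _conflito(valores)]:
--         del lista[chave]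
--     return lista
-- ===== Notes on version B (the rewrite author's own statement) =====
-- stated objective: alternative
-- what changed: Replaced the nested index loops that compare every pair of same-day entries (O(n^2) per key worst case) with a single pass per key maintaining a dict of per-day running maximum end times (hora+duracao), flagging a key as soon as an entry starts before an earlier same-day maximum end; on random inputs A short-circuits early so a timing run showed no speed-up.
import Mathlib
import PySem

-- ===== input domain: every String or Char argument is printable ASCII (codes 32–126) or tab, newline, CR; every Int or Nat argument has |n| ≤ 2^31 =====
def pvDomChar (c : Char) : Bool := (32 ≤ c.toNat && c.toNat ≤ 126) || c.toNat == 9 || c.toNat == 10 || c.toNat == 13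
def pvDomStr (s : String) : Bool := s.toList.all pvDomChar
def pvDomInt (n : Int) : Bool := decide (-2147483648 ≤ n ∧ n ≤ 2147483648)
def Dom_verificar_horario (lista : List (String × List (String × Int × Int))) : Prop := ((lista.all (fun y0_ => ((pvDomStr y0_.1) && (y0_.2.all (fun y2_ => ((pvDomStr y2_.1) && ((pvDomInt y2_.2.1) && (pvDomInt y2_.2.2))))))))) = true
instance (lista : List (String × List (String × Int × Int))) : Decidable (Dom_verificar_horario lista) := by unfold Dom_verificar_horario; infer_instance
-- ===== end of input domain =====

-- B replaces A's per-key nested pairwise loops with one pass per key over a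
-- per-day running-maximum-end dict (a different algorithm, not measured faster).
-- A deletes the flagged keys from its argument dict in place and returns it; B
-- performs the same in-place deletions; the equivalence proved is about the return value.


-- ===== PORT A =====
-- inner 'while j < len(valores)' loop: walks valores[i+1:], breaks (true) on a
-- same-day pair with hora1 + duracao1 > hora2
def pvInnerA (dia1 : String) (hora1 duracao1 : Int)
    (rest : List (String × Int × Int)) : Bool :=
  match rest with
  | [] => false
  | (dia2, hora2, _duracao2) :: rest' =>
    if dia1 = dia2 then
      if hora1 + duracao1 > hora2 then true
      else pvInnerA dia1 hora1 duracao1 rest'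
    else pvInnerA dia1 hora1 duracao1 rest'

-- outer 'while i < len(valores)' loop: the key lands in chaves_remover iff some i finds a conflict
def pvOuterA (valores : List (String × Int × Int)) : Bool :=
  match valores with
  | [] => false
  | (dia1, hora1, duracao1) :: rest => pvInnerA dia1 hora1 duracao1 rest || pvOuterA rest

-- 'del lista[chave]' for every collected chave: keeps the non-flagged entries in order
def verificar_horario (lista : List (String × List (String × Int × Int))) : List (String × List (String × Int × Int)) :=
  lista.filter (fun p => !pvOuterA p.2)

-- ===== PORT B =====
-- _conflito: one pass with dict 'fim' of per-day running maximum of hora + duracao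
def pvConflitoB (fim : PySem.Dict String Int) (valores : List (String × Int × Int)) : Bool :=
  match valores with
  | [] => false
  | (dia, hora, duracao) :: rest =>
    match fim.get? dia with
    | some m =>
      if m > hora then true
      else pvConflitoB (fim.insert dia (max m (hora + duracao))) rest
    | none => pvConflitoB (fim.insert dia (hora + duracao)) rest

def verificar_horario_alt (lista : List (String × List (String × Int × Int))) : List (String × List (String × Int × Int)) :=
  lista.filter (fun p => !pvConflitoB PySem.Dict.empty p.2)

-- ===== PRECONDITION & SPEC =====
def Spec_verificar_horario (lista : List (String × List (String × Int × Int))) (out : List (String × List (String × Int × Int))) : Prop := out = verificar_horario_alt lista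
instance (lista : List (String × List (String × Int × Int))) (out : List (String × List (String × Int × Int))) : Decidable (Spec_verificar_horario lista out) := by unfold Spec_verificar_horario; infer_instance

-- ===== CLAIM (what is proved, stated in full; the proofs are below) =====
def Claim_equal_verificar_horario : Prop := ∀ (lista : List (String × List (String × Int × Int))), Dom_verificar_horario lista → Spec_verificar_horario lista (verificar_horario lista)

-- ===== LEMMAS AND PROOFS =====

-- 'does fim already record an end time after hora for dia?'
def pvAccGt (fim : PySem.Dict String Int) (dia : String) (hora : Int) : Bool :=
  match fim.get? dia with
  | some m => decide (m > hora)
  | none => false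

theorem pvInnerA_eq_any (dia1 : String) (hora1 duracao1 : Int)
    (rest : List (String × Int × Int)) :
    pvInnerA dia1 hora1 duracao1 rest
      = rest.any (fun t => decide (dia1 = t.1) && decide (hora1 + duracao1 > t.2.1)) := by
  induction rest with
  | nil => rfl
  | cons hd tl ih =>
    obtain ⟨d2, h2, du2⟩ := hd
    simp only [pvInnerA, List.any_cons, ih]
    split_ifs <;> simp_all

theorem pvAny_or {α : Type} (l : List α) (f g : α → Bool) :
    l.any (fun x => f x || g x) = (l.any f || l.any g) := by
  induction l with
  | nil => rfl
  | cons x xs ih =>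
    simp only [List.any_cons, ih]
    ac_rfl

theorem pvAccGt_insert (fim : PySem.Dict String Int) (dia : String) (v : Int)
    (d2 : String) (h2 : Int) :
    pvAccGt (fim.insert dia v) d2 h2
      = if d2 = dia then decide (v > h2) else pvAccGt fim d2 h2 := by
  unfold pvAccGt
  rw [PySem.Dict.get?_insert]
  split_ifs <;> rfl

theorem pvConflitoB_eq (valores : List (String × Int × Int)) :
    ∀ (fim : PySem.Dict String Int),
      pvConflitoB fim valores
        = (valores.any (fun t => pvAccGt fim t.1 t.2.1) || pvOuterA valores) := by
  induction valores with
  | nil => intro fim; rfl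
  | cons hd rest ih =>
    intro fim
    obtain ⟨dia, hora, duracao⟩ := hd
    simp only [pvConflitoB, pvOuterA, List.any_cons]
    cases hm : fim.get? dia with
    | some m =>
      by_cases hgt : m > hora
      · have : pvAccGt fim dia hora = true := by unfold pvAccGt; rw [hm]; simpa
        simp [hgt, this]
      · have hhd : pvAccGt fim dia hora = false := by unfold pvAccGt; rw [hm]; simpa using hgt
        simp only [if_neg hgt, ih, hhd, Bool.false_or]
        have hpoint : ∀ t : String × Int × Int,
            pvAccGt (fim.insert dia (max m (hora + duracao))) t.1 t.2.1
              = (pvAccGt fim t.1 t.2.1 || (decide (dia = t.1) && decide (hora + duracao > t.2.1))) := by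
          intro t
          rw [pvAccGt_insert]
          by_cases hd : t.1 = dia
          · subst hd
            unfold pvAccGt
            rw [hm]
            by_cases hc1 : m > t.2.1 <;> by_cases hc2 : hora + duracao > t.2.1 <;>
              simp [hc1, hc2]
          · simp [hd, Ne.symm hd]
        rw [List.any_congr rfl hpoint, pvAny_or, pvInnerA_eq_any]
        ac_rfl
    | none =>
      have hhd : pvAccGt fim dia hora = false := by unfold pvAccGt; rw [hm]
      simp only [ih, hhd, Bool.false_or]
      have hpoint : ∀ t : String × Int × Int,
          pvAccGt (fim.insert dia (hora + duracao)) t.1 t.2.1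
            = (pvAccGt fim t.1 t.2.1 || (decide (dia = t.1) && decide (hora + duracao > t.2.1))) := by
        intro t
        rw [pvAccGt_insert]
        by_cases hd : t.1 = dia
        · subst hd
          unfold pvAccGt
          rw [hm]
          by_cases hc2 : hora + duracao > t.2.1 <;> simp [hc2]
        · simp [hd, Ne.symm hd]
      rw [List.any_congr rfl hpoint, pvAny_or, pvInnerA_eq_any]
      ac_rfl

theorem pvConflitoB_empty (valores : List (String × Int × Int)) :
    pvConflitoB PySem.Dict.empty valores = pvOuterA valores := by
  rw [pvConflitoB_eq]
  have : ∀ t : String × Int × Int, pvAccGt PySem.Dict.empty t.1 t.2.1 = false := by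
    intro t; unfold pvAccGt; rw [PySem.Dict.get?_empty]
  rw [List.any_congr rfl this]
  simp

-- ===== VERDICT (by name: the statement is the Claim_ definition above) =====
theorem verificar_horario_spec : Claim_equal_verificar_horario := by
  intro lista _
  unfold Spec_verificar_horario verificar_horario verificar_horario_alt
  exact List.filter_congr (fun p _ => by rw [pvConflitoB_empty])
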